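-- pv_equiv track=rewrite | github.com/naye0ng/Algorithm | Programmers/완전탐색/모의고사.py | solution
-- ===== SOURCE A (Python) =====
-- p1 = [1,2,3,4,5]
--
-- p2 = [2,1,2,3,2,4,2,5]
--
-- p3 = [3,3,1,1,2,2,4,4,5,5]
--
-- def solution(answers):
--     s1, s2, s3 = 0, 0, 0
--
--     for i in range(len(answers)):
--         if answers[i] == p1[i%5] :
--             s1 += 1
--         if answers[i] == p2[i%8] :
--             s2 += 1
--         if answers[i] == p3[i%10] :
--             s3 += 1
--
--     S = max(s1,s2,s3)
--     answer = []
--     if S == s1 :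
--         answer.append(1)
--     if S == s2 :
--         answer.append(2)
--     if S == s3 :
--         answer.append(3)
--
--     return answer
-- ===== SOURCE B (Python) =====
-- PATTERNS = [[1, 2, 3, 4, 5],
--             [2, 1, 2, 3, 2, 4, 2, 5],
--             [3, 3, 1, 1, 2, 2, 4, 4, 5, 5]]
-- CYCLE = 40  # lcm of the three pattern lengths; every pattern repeats with period 40
--
-- def solution(answers):
--     # Bucket the input once by index residue mod 40: counter keyed by (i % 40, value).
--     cnt = {}
--     for k in ((i % CYCLE, a) for i, a in enumerate(answers)):
--         cnt[k] = cnt.get(k, 0) + 1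
--     # Each pattern's score is read off the 40 residue classes, not by rescanning answers.
--     scores = [sum(cnt.get((r, p[r % len(p)]), 0) for r in range(CYCLE))
--               for p in PATTERNS]
--     best = max(scores)
--     return [i + 1 for i, s in enumerate(scores) if s == best]
-- ===== Notes on version B (the rewrite author's own statement) =====
-- stated objective: alternative
-- what changed: Replaces A's per-index pattern comparisons by a residue-class aggregation: one pass builds a counter keyed by (i % 40, answer) (40 = lcm of the pattern lengths), and each pattern's score is then read off the at-most-40 residue classes without rescanning answers; the result list is built by a comprehension over the scores instead of three if-appends.
import Mathlib
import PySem

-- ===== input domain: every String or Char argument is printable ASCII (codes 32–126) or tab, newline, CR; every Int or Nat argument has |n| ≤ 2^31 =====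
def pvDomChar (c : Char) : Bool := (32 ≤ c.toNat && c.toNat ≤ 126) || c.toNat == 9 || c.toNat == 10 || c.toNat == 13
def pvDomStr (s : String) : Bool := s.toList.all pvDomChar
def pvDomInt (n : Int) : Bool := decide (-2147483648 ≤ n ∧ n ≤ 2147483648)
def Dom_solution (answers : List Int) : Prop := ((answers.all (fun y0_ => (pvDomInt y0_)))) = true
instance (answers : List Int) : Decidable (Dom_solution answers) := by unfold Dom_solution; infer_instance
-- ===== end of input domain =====

-- B replaces the per-index pattern comparisons by a residue-class counter mod 40 (lcm of the
-- pattern lengths) read off per pattern; objective: alternative (same O(n), different algorithm).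

-- ===== PORT A =====
def pA1 : List Int := [1,2,3,4,5]
def pA2 : List Int := [2,1,2,3,2,4,2,5]
def pA3 : List Int := [3,3,1,1,2,2,4,4,5,5]

-- answers[i] / pk[i%…] are always in range here, so pyGetD with default 0 is exact
def solution (answers : List Int) : List Int :=
  let st := (PySem.List.pyRange 0 (answers.length : Int) 1).foldl
    (fun (s : Int × Int × Int) i =>
      let a := PySem.List.pyGetD answers i 0
      let s1 := if a = PySem.List.pyGetD pA1 (PySem.Int.mod i 5) 0 then s.1 + 1 else s.1
      let s2 := if a = PySem.List.pyGetD pA2 (PySem.Int.mod i 8) 0 then s.2.1 + 1 else s.2.1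
      let s3 := if a = PySem.List.pyGetD pA3 (PySem.Int.mod i 10) 0 then s.2.2 + 1 else s.2.2
      (s1, s2, s3)) ((0 : Int), (0 : Int), (0 : Int))
  let S := max st.1 (max st.2.1 st.2.2)
  let ans1 : List Int := []
  let ans2 := if S = st.1 then ans1 ++ [1] else ans1
  let ans3 := if S = st.2.1 then ans2 ++ [2] else ans2
  if S = st.2.2 then ans3 ++ [3] else ans3

-- ===== PORT B =====
def patternsB : List (List Int) := [[1,2,3,4,5],[2,1,2,3,2,4,2,5],[3,3,1,1,2,2,4,4,5,5]]

-- cnt[k] = cnt.get(k, 0) + 1 over k = (i % 40, a) for i, a in enumerate(answers)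
def cntB (answers : List Int) : PySem.Dict (Int × Int) Int :=
  ((PySem.List.enumerate answers 0).map (fun ia => (PySem.Int.mod ia.1 40, ia.2))).foldl
    (fun d k => d.insert k (d.getD k 0 + 1)) PySem.Dict.empty

-- sum(cnt.get((r, p[r % len(p)]), 0) for r in range(40))
def scoreB (cnt : PySem.Dict (Int × Int) Int) (p : List Int) : Int :=
  ((PySem.List.pyRange 0 40 1).map
    (fun r => cnt.getD (r, PySem.List.pyGetD p (PySem.Int.mod r (p.length : Int)) 0) 0)).sum

def solution_alt (answers : List Int) : List Int :=
  let cnt := cntB answers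
  let scores := patternsB.map (fun p => scoreB cnt p)
  let best := match PySem.List.max? scores (fun s => s) with
    | some m => m
    | none => 0   -- unreachable: scores has three elements
  ((PySem.List.enumerate scores 0).filter (fun q => q.2 == best)).map (fun q => q.1 + 1)

-- ===== PRECONDITION & SPEC =====
def Spec_solution (answers : List Int) (out : List Int) : Prop := out = solution_alt answers
instance (answers : List Int) (out : List Int) : Decidable (Spec_solution answers out) := by unfold Spec_solution; infer_instance

-- ===== CLAIM (what is proved, stated in full; the proofs are below) =====
def Claim_equal_solution : Prop := ∀ (answers : List Int), Dom_solution answers → Spec_solution answers (solution answers)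

-- ===== LEMMAS AND PROOFS =====

-- per-pattern hit count over an arbitrary index list
def gCnt (answers p : List Int) (m : Int) (l : List Int) : Int :=
  (l.map (fun j => if PySem.List.pyGetD answers j 0 = PySem.List.pyGetD p (PySem.Int.mod j m) 0 then (1 : Int) else 0)).sum

theorem foldA_triple (answers : List Int) (l : List Int) (s1 s2 s3 : Int) :
    l.foldl
      (fun (s : Int × Int × Int) i =>
        let a := PySem.List.pyGetD answers i 0
        let t1 := if a = PySem.List.pyGetD pA1 (PySem.Int.mod i 5) 0 then s.1 + 1 else s.1
        let t2 := if a = PySem.List.pyGetD pA2 (PySem.Int.mod i 8) 0 then s.2.1 + 1 else s.2.1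
        let t3 := if a = PySem.List.pyGetD pA3 (PySem.Int.mod i 10) 0 then s.2.2 + 1 else s.2.2
        (t1, t2, t3)) (s1, s2, s3)
    = (s1 + gCnt answers pA1 5 l, s2 + gCnt answers pA2 8 l, s3 + gCnt answers pA3 10 l) := by
  induction l generalizing s1 s2 s3 with
  | nil => simp [gCnt]
  | cons x xs ih =>
      simp only [List.foldl_cons, gCnt, List.map_cons, List.sum_cons, ih]
      split_ifs <;> simp only [Prod.mk.injEq] <;> refine ⟨by ring, by ring, by ring⟩

-- a 0/1 indicator summed over a nodup list that contains c, condition forcing r = c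
theorem sum_indicator_zero (R : List Int) (c : Int) (hc : c ∉ R) (P : Int → Prop) [DecidablePred P] :
    (R.map (fun r => if r = c ∧ P r then (1 : Int) else 0)).sum = 0 := by
  induction R with
  | nil => simp
  | cons x R ih =>
      simp only [List.mem_cons, not_or] at hc
      have hne : ¬(x = c ∧ P x) := fun h => hc.1 h.1.symm
      simp [hne, ih hc.2]

theorem sum_indicator_unique (R : List Int) (hnd : R.Nodup) (c : Int) (hc : c ∈ R)
    (P : Int → Prop) [DecidablePred P] :
    (R.map (fun r => if r = c ∧ P r then (1 : Int) else 0)).sum = if P c then 1 else 0 := by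
  induction R with
  | nil => cases hc
  | cons x R ih =>
      rcases List.nodup_cons.mp hnd with ⟨hx, hnd'⟩
      rcases List.mem_cons.mp hc with h | h
      · subst h
        simp only [List.map_cons, List.sum_cons, sum_indicator_zero R c hx P]
        by_cases hP : P c <;> simp [hP]
      · have hxc : x ≠ c := fun e => hx (e ▸ h)
        have hne : ¬(x = c ∧ P x) := fun hh => hxc hh.1
        simp only [List.map_cons, List.sum_cons, if_neg hne, zero_add]
        exact ih hnd' h

-- sum swap for Int-valued double sums over lists
theorem sum_map_sum_comm (S R : List Int) (e : Int → Int → Int) :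
    (R.map (fun r => (S.map (fun j => e j r)).sum)).sum
      = (S.map (fun j => (R.map (fun r => e j r)).sum)).sum := by
  induction S with
  | nil => simp
  | cons x S ih =>
      simp only [List.map_cons, List.sum_cons, ← ih]
      rw [← PySem.List.sum_map_add_int]

theorem getD_cntB (answers : List Int) (k : Int × Int) :
    (cntB answers).getD k 0
      = ((((PySem.List.enumerate answers 0).map (fun ia => (PySem.Int.mod ia.1 40, ia.2))).count k : Nat) : Int) := by
  unfold cntB
  rw [PySem.Dict.getD_foldl_insert_add_one]
  simp [PySem.Dict.getD_empty]

theorem scoreB_eq_gCnt (answers p : List Int) (hp : 0 < p.length) (hd : (p.length : Int) ∣ 40) :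
    scoreB (cntB answers) p
      = gCnt answers p (p.length : Int) (PySem.List.pyRange 0 (answers.length : Int) 1) := by
  unfold scoreB
  have hK : (PySem.List.enumerate answers 0).map (fun ia => (PySem.Int.mod ia.1 40, ia.2))
      = (PySem.List.pyRange 0 (answers.length : Int) 1).map
          (fun j => (PySem.Int.mod j 40, PySem.List.pyGetD answers j 0)) := by
    rw [PySem.List.enumerate_eq_map_pyRange (d := 0), List.map_map]
    simp [PySem.List.len]
  -- rewrite each dict lookup as an indicator sum over the index range
  have step : ∀ r : Int,
      (cntB answers).getD (r, PySem.List.pyGetD p (PySem.Int.mod r (p.length : Int)) 0) 0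
        = ((PySem.List.pyRange 0 (answers.length : Int) 1).map
            (fun j => if PySem.Int.mod j 40 = r ∧
                PySem.List.pyGetD answers j 0 = PySem.List.pyGetD p (PySem.Int.mod r (p.length : Int)) 0
              then (1 : Int) else 0)).sum := by
    intro r
    rw [getD_cntB, hK, List.count_eq_countP, List.countP_map]
    rw [← PySem.List.sum_map_ite_one_zero]
    congr 1
    apply List.map_congr_left
    intro j _
    simp [Function.comp, Prod.ext_iff]
  simp only [step]
  rw [sum_map_sum_comm (PySem.List.pyRange 0 (answers.length : Int) 1) (PySem.List.pyRange 0 40 1)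
    (fun j r => if PySem.Int.mod j 40 = r ∧
        PySem.List.pyGetD answers j 0 = PySem.List.pyGetD p (PySem.Int.mod r (p.length : Int)) 0
      then (1 : Int) else 0)]
  unfold gCnt
  congr 1
  apply List.map_congr_left
  intro j hj
  have hj0 : 0 ≤ j := ((PySem.List.mem_pyRange_one).mp hj).1
  have hm0 : 0 ≤ PySem.Int.mod j 40 := PySem.Int.mod_nonneg j (by norm_num)
  have hm40 : PySem.Int.mod j 40 < 40 := PySem.Int.mod_lt j (by norm_num)
  have hmem : PySem.Int.mod j 40 ∈ PySem.List.pyRange 0 40 1 :=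
    (PySem.List.mem_pyRange_one).mpr ⟨hm0, hm40⟩
  have hswap : ∀ r : Int, (PySem.Int.mod j 40 = r) = (r = PySem.Int.mod j 40) := by
    intro r; exact propext ⟨Eq.symm, Eq.symm⟩
  simp only [hswap]
  rw [sum_indicator_unique (PySem.List.pyRange 0 40 1) (PySem.List.nodup_pyRange_one 0 40)
    (PySem.Int.mod j 40) hmem
    (fun r => PySem.List.pyGetD answers j 0 = PySem.List.pyGetD p (PySem.Int.mod r (p.length : Int)) 0)]
  -- mod (mod j 40) len = mod j len  since len ∣ 40
  have hlen : (0 : Int) < (p.length : Int) := by exact_mod_cast hp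
  have hmm : PySem.Int.mod (PySem.Int.mod j 40) (p.length : Int) = PySem.Int.mod j (p.length : Int) := by
    rw [PySem.Int.mod_eq_emod_of_pos hlen, PySem.Int.mod_eq_emod_of_pos (by norm_num : (0:Int) < 40),
      PySem.Int.mod_eq_emod_of_pos hlen]
    exact Int.emod_emod_of_dvd j hd
  rw [hmm]

theorem solution_equals_alt : ∀ (answers : List Int), solution answers = solution_alt answers := by
  intro answers
  unfold solution solution_alt
  simp only [foldA_triple, zero_add]
  rw [show patternsB.map (fun p => scoreB (cntB answers) p)
        = [scoreB (cntB answers) pA1, scoreB (cntB answers) pA2, scoreB (cntB answers) pA3] from by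
      simp [patternsB, pA1, pA2, pA3]]
  rw [scoreB_eq_gCnt answers pA1 (by simp [pA1]) (by simp [pA1]),
      scoreB_eq_gCnt answers pA2 (by simp [pA2]) (by simp [pA2]),
      scoreB_eq_gCnt answers pA3 (by simp [pA3]) (by simp [pA3])]
  have e1 : ((pA1.length : Int)) = 5 := by simp [pA1]
  have e2 : ((pA2.length : Int)) = 8 := by simp [pA2]
  have e3 : ((pA3.length : Int)) = 10 := by simp [pA3]
  rw [e1, e2, e3]
  set x := gCnt answers pA1 5 (PySem.List.pyRange 0 (answers.length : Int) 1)
  set y := gCnt answers pA2 8 (PySem.List.pyRange 0 (answers.length : Int) 1)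
  set z := gCnt answers pA3 10 (PySem.List.pyRange 0 (answers.length : Int) 1)
  simp only [PySem.List.max?_id_cons]
  have hmax : max x (max y z) = [y, z].foldl max x := by
    simp [List.foldl, max_assoc]
  rw [← hmax]
  generalize max x (max y z) = S
  simp only [PySem.List.enumerate_cons, PySem.List.enumerate_nil, List.filter_cons,
    List.filter_nil, beq_iff_eq]
  split_ifs <;> first | rfl | omega

-- ===== VERDICT (by name: the statement is the Claim_ definition above) =====
theorem solution_spec : Claim_equal_solution := fun answers _ => solution_equals_alt answers
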